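-- pv_equiv track=rewrite | github.com/jessedhillon/mdns-filter | mdns_filter/__main__.py | parse_service_name
-- ===== SOURCE A (Python) =====
-- def parse_service_name(name: str) -> tuple[str | None, str | None, str]:
--     """
--     Parse an mDNS service name into instance, service, and domain.
--
--     Examples:
--         "Google-Cast-Group-xxx._googlecast._tcp.local"
--         -> ("Google-Cast-Group-xxx", "_googlecast._tcp", "local")
--
--         "_googlecast._tcp.local"
--         -> (None, "_googlecast._tcp", "local")
--     """
--     parts = name.split(".")
--
--     # Find service type pattern (_name._tcp or _name._udp)
--     service_start = None
--     for idx, part in enumerate(parts):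
--         if part.startswith("_") and idx + 1 < len(parts):
--             next_part = parts[idx + 1]
--             if next_part in ("_tcp", "_udp"):
--                 service_start = idx
--                 break
--
--     if service_start is None:
--         # No service pattern found
--         return None, None, parts[-1] if parts else "local"
--
--     instance = ".".join(parts[:service_start]) if service_start > 0 else None
--     service = f"{parts[service_start]}.{parts[service_start + 1]}"
--     domain = ".".join(parts[service_start + 2 :]) if service_start + 2 < len(parts) else "local"
--
--     return instance, service, domain
-- ===== SOURCE B (Python) =====
-- def parse_service_name(name: str) -> tuple:
--     # Single left-to-right pass over the dot-separated segments with an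
--     # accumulator for the instance parts; no index bookkeeping or re-slicing.
--     parts = name.split(".")
--     inst = []
--     rest = parts
--     while len(rest) >= 2:
--         if rest[0].startswith("_") and rest[1] in ("_tcp", "_udp"):
--             instance = ".".join(inst) if inst else None
--             service = rest[0] + "." + rest[1]
--             domain = ".".join(rest[2:]) if len(rest) > 2 else "local"
--             return instance, service, domain
--         inst.append(rest[0])
--         rest = rest[1:]
--     return None, None, parts[-1]
-- ===== Notes on version B (the rewrite author's own statement) =====
-- stated objective: simpler
-- what changed: Replaces A's enumerate-search for a service-start index followed by slice-and-join reconstruction with a single left-to-right pass over the segments that accumulates the instance parts and returns directly from the loop, with no index bookkeeping.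
import Mathlib
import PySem

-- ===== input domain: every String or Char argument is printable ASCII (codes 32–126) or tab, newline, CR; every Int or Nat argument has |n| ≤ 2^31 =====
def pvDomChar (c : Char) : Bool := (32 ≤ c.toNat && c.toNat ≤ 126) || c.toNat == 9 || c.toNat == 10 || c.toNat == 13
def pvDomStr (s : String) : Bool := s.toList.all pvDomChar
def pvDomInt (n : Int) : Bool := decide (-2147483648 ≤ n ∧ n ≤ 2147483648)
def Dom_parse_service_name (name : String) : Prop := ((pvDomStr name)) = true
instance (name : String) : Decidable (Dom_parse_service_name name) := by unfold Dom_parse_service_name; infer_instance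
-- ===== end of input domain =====

-- B replaces A's index-hunting loop + slice/join reconstruction by a single
-- left-to-right pass over the segments with an instance accumulator (objective: simpler).


-- ===== PORT A =====
-- the 'for idx, part in enumerate(parts): … break' search for service_start
def pvAFind (parts : List String) (idx : Nat) : Option Nat :=
  if h : idx < parts.length then
    if PySem.Str.startswith (parts.getD idx "") "_" && decide (idx + 1 < parts.length) &&
       (parts.getD (idx + 1) "" == "_tcp" || parts.getD (idx + 1) "" == "_udp")
    then some idx
    else pvAFind parts (idx + 1)
  else none
termination_by parts.length - idx

def parse_service_name (name : String) : Option String × Option String × String :=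
  let parts := (PySem.Str.split? name ".").getD []  -- "." ≠ "" so split? is some
  match pvAFind parts 0 with
  | none =>
      -- 'parts[-1] if parts else "local"' (split never yields an empty list)
      (none, none, PySem.List.pyGetD parts (-1) "local")
  | some s =>
      ((if s > 0 then some (PySem.Str.join "." (parts.take s)) else none),
       some (parts.getD s "" ++ "." ++ parts.getD (s + 1) ""),
       (if s + 2 < parts.length then PySem.Str.join "." (parts.drop (s + 2)) else "local"))

-- ===== PORT B =====
-- the 'while len(rest) >= 2' pass of Source B, carrying the instance accumulator
def pvBLoop (inst rest parts : List String) : Option String × Option String × String :=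
  match rest with
  | r0 :: r1 :: rs =>
      if PySem.Str.startswith r0 "_" && (r1 == "_tcp" || r1 == "_udp") then
        ((if inst.isEmpty then none else some (PySem.Str.join "." inst)),
         some (r0 ++ "." ++ r1),
         (if rs.isEmpty then "local" else PySem.Str.join "." rs))
      else pvBLoop (inst ++ [r0]) (r1 :: rs) parts
  | _ =>
      -- 'return None, None, parts[-1]' (split never yields an empty list)
      (none, none, PySem.List.pyGetD parts (-1) "local")

def parse_service_name_alt (name : String) : Option String × Option String × String :=
  let parts := (PySem.Str.split? name ".").getD []  -- "." ≠ "" so split? is some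
  pvBLoop [] parts parts

-- ===== PRECONDITION & SPEC =====
def Spec_parse_service_name (name : String) (out : Option String × Option String × String) : Prop := out = parse_service_name_alt name
instance (name : String) (out : Option String × Option String × String) : Decidable (Spec_parse_service_name name out) := by unfold Spec_parse_service_name; infer_instance

-- ===== CLAIM (what is proved, stated in full; the proofs are below) =====
def Claim_equal_parse_service_name : Prop := ∀ (name : String), Dom_parse_service_name name → Spec_parse_service_name name (parse_service_name name)

-- ===== LEMMAS AND PROOFS =====

-- result of A's post-search reconstruction, as a function of the found index
def pvAOut (parts : List String) : Option Nat → Option String × Option String × String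
  | none => (none, none, PySem.List.pyGetD parts (-1) "local")
  | some s =>
      ((if s > 0 then some (PySem.Str.join "." (parts.take s)) else none),
       some (parts.getD s "" ++ "." ++ parts.getD (s + 1) ""),
       (if s + 2 < parts.length then PySem.Str.join "." (parts.drop (s + 2)) else "local"))

lemma pvBLoop_eq (rest : List String) : ∀ inst parts : List String, parts = inst ++ rest →
    pvBLoop inst rest parts = pvAOut parts (pvAFind parts inst.length) := by
  induction rest with
  | nil =>
      intro inst parts h
      have hlen : parts.length = inst.length := by simp [h]
      rw [pvAFind]
      simp [pvBLoop, hlen, pvAOut]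
  | cons r0 tail ih =>
      intro inst parts h
      cases tail with
      | nil =>
          -- rest = [r0]: A's guard 'idx+1 < len' fails, then the loop ends with none
          have hlen : parts.length = inst.length + 1 := by simp [h]
          have h1 : pvAFind parts (inst.length + 1) = none := by
            rw [pvAFind]; simp [hlen]
          rw [pvAFind]
          simp [pvBLoop, pvAOut, hlen, h1]
      | cons r1 rs =>
          have hlen : parts.length = inst.length + (rs.length + 2) := by simp [h]
          have hg0 : parts.getD inst.length "" = r0 := by
            simp [h, List.getD_eq_getElem?_getD]
          have hg1 : parts.getD (inst.length + 1) "" = r1 := by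
            simp [h, List.getD_eq_getElem?_getD]
          rw [pvAFind]
          simp only [hlen, hg0, hg1]
          by_cases hc : (PySem.Str.startswith r0 "_" && (r1 == "_tcp" || r1 == "_udp")) = true
          · -- match found here: both sides build the triple from inst / r0 / r1 / rs
            have hcond : (PySem.Str.startswith r0 "_" &&
                decide (inst.length + 1 < inst.length + (rs.length + 2)) &&
                (r1 == "_tcp" || r1 == "_udp")) = true := by
              simp_all
            simp only [pvBLoop, hc, if_true, dif_pos (by omega : inst.length < inst.length + (rs.length + 2)), hcond]
            have htake : parts.take inst.length = inst := by simp [h]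
            have hdrop : parts.drop (inst.length + 2) = rs := by
              have : parts = (inst ++ [r0, r1]) ++ rs := by simp [h]
              rw [this]
              have : (inst ++ [r0, r1]).length = inst.length + 2 := by simp
              rw [← this, List.drop_left]
            simp only [pvAOut, htake, hdrop, hg0, hg1, hlen]
            refine Prod.ext ?_ (Prod.ext ?_ ?_) <;> simp [List.isEmpty_iff]
            · cases inst <;> simp
            · cases rs <;> simp
          · -- no match here: both loops step to the next segment
            have hcond : (PySem.Str.startswith r0 "_" &&
                decide (inst.length + 1 < inst.length + (rs.length + 2)) &&
                (r1 == "_tcp" || r1 == "_udp")) = false := by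
              simp_all
            simp only [pvBLoop, hc, dif_pos (by omega : inst.length < inst.length + (rs.length + 2)), hcond]
            have h' : parts = (inst ++ [r0]) ++ (r1 :: rs) := by simp [h]
            have := ih (inst ++ [r0]) parts h'
            simpa [hlen] using this

-- ===== VERDICT (by name: the statement is the Claim_ definition above) =====
theorem parse_service_name_spec : Claim_equal_parse_service_name := by
  intro name _
  unfold Spec_parse_service_name
  simp only [parse_service_name, parse_service_name_alt]
  have hb := pvBLoop_eq ((PySem.Str.split? name ".").getD []) [] ((PySem.Str.split? name ".").getD []) (by simp)
  simp only [List.length_nil] at hb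
  rw [hb]
  cases hx : pvAFind ((PySem.Str.split? name ".").getD []) 0 <;> simp [pvAOut]
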